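-- pv_equiv track=rewrite | github.com/ArturFg/DZ_PY2 | dz_sim2/dz_sim1,3.py | Sum_Three
-- ===== SOURCE A (Python) =====
-- def Sum_Three(num):
--     su = 0
--     size = 1
--     while size <= 3:
--         temporary = 0
--         temporary = num % 10
--         su = su + temporary
--         num = num // 10
--         size += 1
--     return(su, num)
-- ===== SOURCE B (Python) =====
-- def Sum_Three(num):
--     q, r = divmod(num, 1000)
--     return (sum(map(int, str(r))), q)
-- ===== Notes on version B (the rewrite author's own statement) =====
-- stated objective: alternative
-- what changed: Replaced the counter-driven digit-peeling while loop by a single divmod(num, 1000) split and a sum over the decimal-string digits of the remainder.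
import Mathlib
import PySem

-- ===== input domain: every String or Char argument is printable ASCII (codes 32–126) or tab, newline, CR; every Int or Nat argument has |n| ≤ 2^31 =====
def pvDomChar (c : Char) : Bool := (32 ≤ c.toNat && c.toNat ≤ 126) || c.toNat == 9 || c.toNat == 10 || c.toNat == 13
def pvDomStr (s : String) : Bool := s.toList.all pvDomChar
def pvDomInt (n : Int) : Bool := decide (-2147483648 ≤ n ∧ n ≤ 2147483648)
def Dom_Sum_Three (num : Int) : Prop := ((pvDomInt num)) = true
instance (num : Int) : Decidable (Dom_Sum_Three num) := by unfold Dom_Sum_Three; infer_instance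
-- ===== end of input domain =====

-- B replaces the digit-peeling while loop by one divmod(num, 1000) and a decimal
-- string rendering of the remainder whose character digits are summed; objective: alternative.

-- ===== PORT A =====
-- the while loop: state (su, num), counter size running from 1 while size ≤ 3
def Sum_Three_loop (su num : Int) (size : Nat) : Int × Int :=
  if size ≤ 3 then
    let temporary := PySem.Int.mod num 10
    Sum_Three_loop (su + temporary) (PySem.Int.floordiv num 10) (size + 1)
  else (su, num)
termination_by 4 - size

def Sum_Three (num : Int) : Int × Int := Sum_Three_loop 0 num 1

-- ===== PORT B =====
-- q, r = divmod(num, 1000); return (sum(map(int, str(r))), q)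
-- (int(c) on a single digit character never raises here; ported as ofStr? with getD 0)
def Sum_Three_alt (num : Int) : Int × Int :=
  let q := PySem.Int.floordiv num 1000
  let r := PySem.Int.mod num 1000
  (((PySem.Int.toStr r).toList.map
      (fun c => (PySem.Int.ofStr? (String.ofList [c])).getD 0)).sum, q)

-- ===== PRECONDITION & SPEC =====
def Spec_Sum_Three (num : Int) (out : Int × Int) : Prop := out = Sum_Three_alt num
instance (num : Int) (out : Int × Int) : Decidable (Spec_Sum_Three num out) := by unfold Spec_Sum_Three; infer_instance

-- ===== CLAIM (what is proved, stated in full; the proofs are below) =====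
def Claim_equal_Sum_Three : Prop := ∀ (num : Int), Dom_Sum_Three num → Spec_Sum_Three num (Sum_Three num)

-- ===== LEMMAS AND PROOFS =====
theorem Sum_Three_loop_unfold (su num : Int) (size : Nat) :
    Sum_Three_loop su num size =
      if size ≤ 3 then
        Sum_Three_loop (su + PySem.Int.mod num 10) (PySem.Int.floordiv num 10) (size + 1)
      else (su, num) := by
  rw [Sum_Three_loop]

-- the string digit sum of a three-digit remainder, checked for all 1000 values
set_option maxHeartbeats 4000000 in
set_option maxRecDepth 10000 in
theorem strDigitSum_eq : ∀ k : Fin 1000, (((PySem.Int.toStr (k:Int)).toList.map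
    (fun c => (PySem.Int.ofStr? (String.ofList [c])).getD 0)).sum : Int)
    = (k:Int) % 10 + ((k:Int) / 10) % 10 + (k:Int) / 100 := by decide

-- ===== VERDICT (by name: the statement is the Claim_ definition above) =====
theorem Sum_Three_spec : Claim_equal_Sum_Three := by
  intro num _
  show Sum_Three num = Sum_Three_alt num
  unfold Sum_Three Sum_Three_alt
  rw [Sum_Three_loop_unfold, Sum_Three_loop_unfold, Sum_Three_loop_unfold,
      Sum_Three_loop_unfold]
  simp only [show (1:Nat) ≤ 3 by norm_num, show (2:Nat) ≤ 3 by norm_num,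
    show (3:Nat) ≤ 3 by norm_num, if_true, show ¬ (4 ≤ 3) by norm_num, if_false,
    PySem.Int.mod_eq_emod_of_pos (by norm_num : (0:Int) < 10),
    PySem.Int.mod_eq_emod_of_pos (by norm_num : (0:Int) < 1000),
    PySem.Int.floordiv_eq_ediv_of_pos (by norm_num : (0:Int) < 10),
    PySem.Int.floordiv_eq_ediv_of_pos (by norm_num : (0:Int) < 1000)]
  have hr0 : 0 ≤ num % 1000 := Int.emod_nonneg _ (by norm_num)
  have hr1 : num % 1000 < 1000 := Int.emod_lt_of_pos _ (by norm_num)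
  have hk := strDigitSum_eq ⟨(num % 1000).toNat, by omega⟩
  have hcast : ((⟨(num % 1000).toNat, by omega⟩ : Fin 1000) : Int) = num % 1000 := by
    simp; omega
  rw [hcast] at hk
  rw [hk]
  refine Prod.ext ?_ ?_ <;> simp only <;> omega
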